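-- pv_equiv track=rewrite | github.com/thanh01pmt/react-quest-monorepo | 20251220 - UI_MAP_BUILDER_INTEGRATION/solver/synthesizers/base.py | find_longest_repeating_sequence
-- ===== SOURCE A (Python) =====
-- from typing import List, Dict, Set, Tuple, Optional, Any
--
-- def find_longest_repeating_sequence(actions: List[str]) -> Tuple[Optional[List[str]], int, int, int]:
--     """
--     Tìm chuỗi lặp lại dài nhất liên tiếp trong actions.
--
--     Returns:
--         (sequence, repeat_count, sequence_length, start_index)
--     """
--     best_seq, best_repeats, best_len, best_start = None, 0, 0, 0
--
--     for start in range(len(actions)):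
--         for length in range(1, (len(actions) - start) // 2 + 1):
--             pattern = actions[start:start + length]
--             count = 1
--             pos = start + length
--
--             while pos + length <= len(actions):
--                 if actions[pos:pos + length] == pattern:
--                     count += 1
--                     pos += length
--                 else:
--                     break
--
--             if count > 1 and count * length > best_repeats * best_len:
--                 best_seq = pattern
--                 best_repeats = count
--                 best_len = length
--                 best_start = start
--
--     return best_seq, best_repeats, best_len, best_start
-- ===== SOURCE B (Python) =====
-- from typing import List, Tuple, Optional
--
-- def find_longest_repeating_sequence(actions: List[str]) -> Tuple[Optional[List[str]], int, int, int]: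
--     n = len(actions)
--     # table[i][j] = length of the longest common prefix of actions[i:] and actions[j:]
--     row = [0] * (n + 1)
--     table = [row]
--     for i in range(n - 1, -1, -1):
--         row = [row[j + 1] + 1 if actions[i] == actions[j] else 0 for j in range(n)] + [0]
--         table.insert(0, row)
--
--     best_seq, best_repeats, best_len, best_start = None, 0, 0, 0
--     for start in range(n):
--         lcp_row = table[start]
--         for length in range(1, (n - start) // 2 + 1):
--             count = 1 + lcp_row[start + length] // length
--             if count > 1 and count * length > best_repeats * best_len:
--                 best_seq = actions[start:start + length]
--                 best_repeats, best_len, best_start = count, length, start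
--     return best_seq, best_repeats, best_len, best_start
-- ===== Notes on version B (the rewrite author's own statement) =====
-- stated objective: faster
-- what changed: B precomputes an LCP (longest-common-prefix-of-suffixes) DP table once, so each (start,length) candidate's repeat count is read off in O(1) as 1 + lcp[start][start+length]//length instead of A's inner while loop that re-compares whole blocks.
import Mathlib
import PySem

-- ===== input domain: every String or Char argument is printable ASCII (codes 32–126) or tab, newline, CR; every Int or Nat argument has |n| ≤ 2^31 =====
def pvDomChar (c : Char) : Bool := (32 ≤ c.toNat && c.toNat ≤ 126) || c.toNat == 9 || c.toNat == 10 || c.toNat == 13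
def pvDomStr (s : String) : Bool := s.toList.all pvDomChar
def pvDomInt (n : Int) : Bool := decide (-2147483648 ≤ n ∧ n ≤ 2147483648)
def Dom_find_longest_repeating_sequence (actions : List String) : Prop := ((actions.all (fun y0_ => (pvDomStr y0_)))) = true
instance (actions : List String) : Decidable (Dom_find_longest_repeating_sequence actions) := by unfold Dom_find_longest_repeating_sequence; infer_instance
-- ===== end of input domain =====

-- B replaces A's inner block-by-block rescanning while-loop by an O(n^2) LCP table; objective: faster (asymptotic, O(n^3) → O(n^2)).

-- ===== PORT A =====
-- actions[i:i+L]  (both ports slice this way)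
def pvSlice (a : List String) (i L : Nat) : List String :=
  PySem.List.slice a (some (i : Int)) (some ((i : Int) + (L : Int)))

-- A's while loop: keep counting while the next block of length L equals pattern.
-- (the '0 < L' conjunct only makes the recursion total; A only calls it with L ≥ 1)
def pvACount (a pattern : List String) (L pos count : Nat) : Nat :=
  if h : pos + L ≤ a.length ∧ pvSlice a pos L = pattern ∧ 0 < L then
    pvACount a pattern L (pos + L) (count + 1)
  else count
termination_by a.length - pos
decreasing_by omega

def find_longest_repeating_sequence (actions : List String) : Option (List String) × Int × Int × Int :=
  let n := actions.length
  let r := (List.range n).foldl (fun st start =>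
    (List.range' 1 ((n - start) / 2)).foldl (fun st length =>
      let pattern := pvSlice actions start length
      let count := pvACount actions pattern length (start + length) 1
      if 1 < count ∧ st.2.1 * st.2.2.1 < count * length then
        (some pattern, count, length, start)
      else st) st)
    ((none : Option (List String)), 0, 0, 0)
  (r.1, (r.2.1 : Int), (r.2.2.1 : Int), (r.2.2.2 : Int))

-- ===== PORT B =====
-- Source B's table loop (i from n-1 down to 0); pvLcpRows a k = rows for i = a.length-k .. a.length
def pvLcpRows (a : List String) : Nat → List (List Nat)
  | 0 => [List.replicate (a.length + 1) 0]
  | k + 1 =>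
    let rows := pvLcpRows a k
    let i := a.length - (k + 1)
    ((List.range a.length).map (fun j =>
        if a.getD i "" = a.getD j "" then (rows.headD []).getD (j + 1) 0 + 1 else 0)
      ++ [0]) :: rows

def find_longest_repeating_sequence_alt (actions : List String) : Option (List String) × Int × Int × Int :=
  let n := actions.length
  let table := pvLcpRows actions n
  let r := (List.range n).foldl (fun st start =>
    let lcpRow := table.getD start []
    (List.range' 1 ((n - start) / 2)).foldl (fun st length =>
      let count := 1 + lcpRow.getD (start + length) 0 / length
      if 1 < count ∧ st.2.1 * st.2.2.1 < count * length then
        (some (pvSlice actions start length), count, length, start)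
      else st) st)
    ((none : Option (List String)), 0, 0, 0)
  (r.1, (r.2.1 : Int), (r.2.2.1 : Int), (r.2.2.2 : Int))

-- ===== PRECONDITION & SPEC =====
def Spec_find_longest_repeating_sequence (actions : List String) (out : Option (List String) × Int × Int × Int) : Prop := out = find_longest_repeating_sequence_alt actions
instance (actions : List String) (out : Option (List String) × Int × Int × Int) : Decidable (Spec_find_longest_repeating_sequence actions out) := by unfold Spec_find_longest_repeating_sequence; infer_instance

-- ===== CLAIM (what is proved, stated in full; the proofs are below) =====
def Claim_equal_find_longest_repeating_sequence : Prop := ∀ (actions : List String), Dom_find_longest_repeating_sequence actions → Spec_find_longest_repeating_sequence actions (find_longest_repeating_sequence actions)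

-- ===== LEMMAS AND PROOFS =====

-- reference LCP of the suffixes at i and j
def pvLcp (a : List String) (i j : Nat) : Nat :=
  if h : i < a.length ∧ j < a.length ∧ a.getD i "" = a.getD j "" then
    pvLcp a (i + 1) (j + 1) + 1
  else 0
termination_by a.length - i
decreasing_by omega

lemma pvLcp_spec (a : List String) : ∀ (t i j : Nat), t < pvLcp a i j →
    i + t < a.length ∧ j + t < a.length ∧ a.getD (i + t) "" = a.getD (j + t) "" := by
  intro t
  induction t with
  | zero =>
    intro i j h
    rw [pvLcp] at h
    split at h
    · next hg => simpa using hg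
    · omega
  | succ t ih =>
    intro i j h
    rw [pvLcp] at h
    split at h
    · next hg =>
      have := ih (i + 1) (j + 1) (by omega)
      constructor
      · omega
      constructor
      · omega
      · have heq := this.2.2
        have e1 : i + 1 + t = i + (t + 1) := by omega
        have e2 : j + 1 + t = j + (t + 1) := by omega
        rwa [e1, e2] at heq
    · omega

lemma pvLcp_max (a : List String) (i j : Nat) :
    ¬(i + pvLcp a i j < a.length ∧ j + pvLcp a i j < a.length ∧
      a.getD (i + pvLcp a i j) "" = a.getD (j + pvLcp a i j) "") := by
  fun_induction pvLcp a i j with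
  | case1 i j hg ih =>
    intro hcon
    apply ih
    refine ⟨by omega, by omega, ?_⟩
    have e1 : i + 1 + pvLcp a (i + 1) (j + 1) = i + (pvLcp a (i + 1) (j + 1) + 1) := by omega
    have e2 : j + 1 + pvLcp a (i + 1) (j + 1) = j + (pvLcp a (i + 1) (j + 1) + 1) := by omega
    rw [e1, e2]
    exact hcon.2.2
  | case2 i j hg =>
    simpa using hg

lemma pvChain (a : List String) (start L : Nat) (hL : 0 < L) :
    ∀ (s t : Nat), t + s * L ≤ pvLcp a start (start + L) →
      a.getD (start + t) "" = a.getD (start + t + s * L) "" := by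
  intro s
  induction s with
  | zero => intro t h; simp
  | succ s ih =>
    intro t h
    have e : (s + 1) * L = s * L + L := by ring
    rw [e] at h ⊢
    have hs := ih t (by omega)
    have hu : t + s * L < pvLcp a start (start + L) := by omega
    have hsp := (pvLcp_spec a (t + s * L) start (start + L) hu).2.2
    have e1 : start + (t + s * L) = start + t + s * L := by omega
    have e2 : start + L + (t + s * L) = start + t + (s * L + L) := by omega
    rw [e1, e2] at hsp
    exact hs.trans hsp

lemma pvSlice_eq_iff (a : List String) (i j L : Nat) (hi : i + L ≤ a.length) (hj : j + L ≤ a.length) :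
    pvSlice a i L = pvSlice a j L ↔ ∀ t < L, a.getD (i + t) "" = a.getD (j + t) "" := by
  rw [pvSlice, pvSlice, PySem.List.slice_natCast_add, PySem.List.slice_natCast_add]
  constructor
  · intro h t ht
    have ht1 : t < ((a.drop i).take L).length := by simp; omega
    have := List.getElem_of_eq h ht1
    simp only [List.getElem_take, List.getElem_drop] at this
    rw [List.getD_eq_getElem _ _ (by omega), List.getD_eq_getElem _ _ (by omega)]
    exact this
  · intro h
    apply List.ext_getElem
    · simp; omega
    · intro t h1 h2
      simp only [List.getElem_take, List.getElem_drop]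
      have htL : t < L := by simp at h1; omega
      have := h t htL
      rwa [List.getD_eq_getElem _ _ (by omega), List.getD_eq_getElem _ _ (by omega)] at this

lemma pvGuard_iff (a : List String) (start L m : Nat) (hL : 0 < L)
    (h2 : start + 2 * L ≤ a.length) (hm : m * L ≤ pvLcp a start (start + L)) :
    (start + L + m * L + L ≤ a.length ∧ pvSlice a (start + L + m * L) L = pvSlice a start L)
      ↔ (m + 1) * L ≤ pvLcp a start (start + L) := by
  have em : (m + 1) * L = m * L + L := by ring
  constructor
  · rintro ⟨hb, hs⟩
    by_contra hk
    rw [em] at hk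
    have ht0L : pvLcp a start (start + L) - m * L < L := by omega
    have hsl := (pvSlice_eq_iff a (start + L + m * L) start L hb (by omega)).1 hs
    have h1 := hsl (pvLcp a start (start + L) - m * L) ht0L
    have h2' := pvChain a start L hL m (pvLcp a start (start + L) - m * L) (by omega)
    apply pvLcp_max a start (start + L)
    refine ⟨by omega, by omega, ?_⟩
    have e1 : start + (pvLcp a start (start + L) - m * L) + m * L = start + pvLcp a start (start + L) := by omega
    have e2 : start + L + m * L + (pvLcp a start (start + L) - m * L) = start + L + pvLcp a start (start + L) := by omega
    rw [e1] at h2'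
    rw [e2] at h1
    exact h2'.symm.trans h1.symm
  · intro hk1
    rw [em] at hk1
    have hb : start + L + m * L + L ≤ a.length := by
      have := (pvLcp_spec a (m * L + L - 1) start (start + L) (by omega)).2.1
      omega
    refine ⟨hb, ?_⟩
    rw [pvSlice_eq_iff a (start + L + m * L) start L hb (by omega)]
    intro t ht
    have hc := pvChain a start L hL m t (by omega)
    have hp := (pvLcp_spec a (m * L + t) start (start + L) (by omega)).2.2
    have e1 : start + (m * L + t) = start + t + m * L := by omega
    have e2 : start + L + (m * L + t) = start + L + m * L + t := by omega
    rw [e1, e2] at hp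
    exact (hc.trans hp).symm

lemma pvCount_eq_aux (a : List String) (start L : Nat) (hL : 0 < L) (h2 : start + 2 * L ≤ a.length) :
    ∀ (d m c : Nat), m * L ≤ pvLcp a start (start + L) →
      pvLcp a start (start + L) / L - m = d →
      pvACount a (pvSlice a start L) L (start + L + m * L) c = c + d := by
  intro d
  induction d with
  | zero =>
    intro m c hm hd
    rw [pvACount]
    split
    · next hcon =>
      exfalso
      obtain ⟨hb, hs, -⟩ := hcon
      have hk1 := (pvGuard_iff a start L m hL h2 hm).1 ⟨hb, hs⟩
      have : m + 1 ≤ pvLcp a start (start + L) / L := (Nat.le_div_iff_mul_le hL).2 hk1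
      omega
    · omega
  | succ d ih =>
    intro m c hm hd
    have hmlt : m + 1 ≤ pvLcp a start (start + L) / L := by omega
    have hk1 : (m + 1) * L ≤ pvLcp a start (start + L) := (Nat.le_div_iff_mul_le hL).1 hmlt
    have hg := (pvGuard_iff a start L m hL h2 hm).2 hk1
    rw [pvACount, dif_pos ⟨hg.1, hg.2, hL⟩]
    have e : start + L + m * L + L = start + L + (m + 1) * L := by ring
    rw [e, ih (m + 1) (c + 1) hk1 (by omega)]
    omega

lemma pvCount_eq (a : List String) (start L : Nat) (hL : 0 < L) (h2 : start + 2 * L ≤ a.length) :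
    pvACount a (pvSlice a start L) L (start + L) 1 = 1 + pvLcp a start (start + L) / L := by
  have := pvCount_eq_aux a start L hL h2 (pvLcp a start (start + L) / L) 0 1 (by omega) (Nat.sub_zero _)
  simpa using this

lemma pvRows_ne_nil (a : List String) (k : Nat) : pvLcpRows a k ≠ [] := by
  cases k <;> simp [pvLcpRows]

lemma pvLcpRows_getD (a : List String) : ∀ (k : Nat), k ≤ a.length → ∀ (m : Nat), m ≤ k → ∀ (j : Nat),
    ((pvLcpRows a k).getD m []).getD j 0 = pvLcp a (a.length - k + m) j := by
  intro k
  induction k with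
  | zero =>
    intro _ m hm j
    have hm0 : m = 0 := by omega
    subst hm0
    simp only [pvLcpRows, List.getD_cons_zero]
    rw [pvLcp, dif_neg (by rintro ⟨h, -⟩; omega)]
    simp [List.getD]
  | succ k ih =>
    intro hk m hm j
    cases m with
    | zero =>
      simp only [pvLcpRows, List.getD_cons_zero]
      rw [Nat.add_zero]
      by_cases hj : j < a.length
      · rw [List.getD_eq_getElem _ _ (by simp; omega)]
        rw [List.getElem_append_left (by simpa)]
        rw [List.getElem_map, List.getElem_range]
        have hhead : (pvLcpRows a k).headD [] = (pvLcpRows a k).getD 0 [] := by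
          cases hkl : pvLcpRows a k with
          | nil => exact absurd hkl (pvRows_ne_nil a k)
          | cons x xs => simp
        have hrec := ih (by omega) 0 (by omega) (j + 1)
        rw [Nat.add_zero] at hrec
        have e : a.length - k = a.length - (k + 1) + 1 := by omega
        rw [e] at hrec
        rw [pvLcp]
        by_cases hc : a.getD (a.length - (k + 1)) "" = a.getD j ""
        · rw [if_pos hc, dif_pos ⟨by omega, hj, hc⟩, hhead, hrec]
        · rw [if_neg hc, dif_neg (by rintro ⟨-, -, h⟩; exact hc h)]
      · rw [pvLcp, dif_neg (by rintro ⟨-, h, -⟩; omega)]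
        by_cases hj2 : j = a.length
        · subst hj2
          rw [List.getD_eq_getElem _ _ (by simp)]
          rw [List.getElem_append_right (by simp)]
          simp
        · rw [List.getD_eq_default _ _ (by simp; omega)]
    | succ m' =>
      simp only [pvLcpRows, List.getD_cons_succ]
      rw [ih (by omega) m' (by omega) j]
      congr 1
      omega

lemma pvFoldlCongr {α β : Type} (l : List α) (f g : β → α → β) (init : β)
    (h : ∀ acc x, x ∈ l → f acc x = g acc x) : l.foldl f init = l.foldl g init := by
  induction l generalizing init with
  | nil => rfl
  | cons x xs ih =>
    rw [List.foldl_cons, List.foldl_cons, h init x (by simp)]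
    exact ih _ (fun acc y hy => h acc y (by simp [hy]))

lemma pvMain (a : List String) :
    (List.range a.length).foldl (fun st start =>
      (List.range' 1 ((a.length - start) / 2)).foldl (fun st length =>
        let pattern := pvSlice a start length
        let count := pvACount a pattern length (start + length) 1
        if 1 < count ∧ st.2.1 * st.2.2.1 < count * length then
          (some pattern, count, length, start)
        else st) st)
      ((none : Option (List String)), 0, 0, 0)
  = (List.range a.length).foldl (fun st start =>
      let lcpRow := (pvLcpRows a a.length).getD start []
      (List.range' 1 ((a.length - start) / 2)).foldl (fun st length =>
        let count := 1 + lcpRow.getD (start + length) 0 / length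
        if 1 < count ∧ st.2.1 * st.2.2.1 < count * length then
          (some (pvSlice a start length), count, length, start)
        else st) st)
      ((none : Option (List String)), 0, 0, 0) := by
  apply pvFoldlCongr
  intro st start hst
  rw [List.mem_range] at hst
  dsimp only
  apply pvFoldlCongr
  intro st2 L hL
  rw [List.mem_range'_1] at hL
  have hL1 : 1 ≤ L := hL.1
  have hL2 : L ≤ (a.length - start) / 2 := by omega
  have h2 : start + 2 * L ≤ a.length := by omega
  have hrow := pvLcpRows_getD a a.length le_rfl start (by omega) (start + L)
  have e : a.length - a.length + start = start := by omega
  rw [e] at hrow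
  rw [pvCount_eq a start L (by omega) h2, hrow]

-- ===== VERDICT (by name: the statement is the Claim_ definition above) =====
theorem find_longest_repeating_sequence_spec : Claim_equal_find_longest_repeating_sequence := by
  intro actions _
  unfold Spec_find_longest_repeating_sequence
  unfold find_longest_repeating_sequence find_longest_repeating_sequence_alt
  exact congrArg
    (fun r : Option (List String) × Nat × Nat × Nat =>
      ((r.1, (r.2.1 : Int), (r.2.2.1 : Int), (r.2.2.2 : Int)) :
        Option (List String) × Int × Int × Int))
    (pvMain actions)
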